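-- pv_equiv track=rewrite | github.com/justin-ardini/adventofcode2023 | day01.py | calibration_value
-- ===== SOURCE A (Python) =====
-- def calibration_value(line, digit_map):
--   first = -1
--   last = -1
--   for i, c in enumerate(line):
--     for k in digit_map:
--       d = digit_map.get(str(line[i:i + len(k)]))
--       if d is not None:
--         last = d
--         if first == -1:
--           first = last
--   return 10 * first + last
-- ===== SOURCE B (Python) =====
-- def calibration_value(line, digit_map):
--   def match_at(i, keys):
--     for k in keys:
--       d = digit_map.get(line[i:i + len(k)])
--       if d is not None:
--         return d
--     return None
--
--   keys = list(digit_map)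
--   first = -1
--   last = -1
--   for i in range(len(line)):
--     d = match_at(i, keys)
--     if d is not None:
--       first = d
--       break
--   for i in range(len(line) - 1, -1, -1):
--     d = match_at(i, list(reversed(keys)))
--     if d is not None:
--       last = d
--       break
--   return 10 * first + last
-- ===== Notes on version B (the rewrite author's own statement) =====
-- stated objective: faster
-- what changed: A makes one exhaustive pass keeping overwrite-style first/last accumulators over every position and key; B runs two directed early-exit scans: left-to-right breaking at the first matching position, and right-to-left (keys in reverse order) breaking at the last matching position, so typical lines are scanned only until a token is found.
-- intended difference: On lines whose earliest token match maps to -1 while some other match maps to a different value, A's 'first == -1' sentinel discards that first match and returns a later value as the first digit (e.g. 55 on line 'ab' with {'a': -1, 'b': 5}), while B returns the genuine first match (-5 there), which is the intended 'first token' value. — e.g. on calibration_value("ab", [("a", -1), ("b", 5)]): A returns 55, B returns -5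
import Mathlib
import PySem

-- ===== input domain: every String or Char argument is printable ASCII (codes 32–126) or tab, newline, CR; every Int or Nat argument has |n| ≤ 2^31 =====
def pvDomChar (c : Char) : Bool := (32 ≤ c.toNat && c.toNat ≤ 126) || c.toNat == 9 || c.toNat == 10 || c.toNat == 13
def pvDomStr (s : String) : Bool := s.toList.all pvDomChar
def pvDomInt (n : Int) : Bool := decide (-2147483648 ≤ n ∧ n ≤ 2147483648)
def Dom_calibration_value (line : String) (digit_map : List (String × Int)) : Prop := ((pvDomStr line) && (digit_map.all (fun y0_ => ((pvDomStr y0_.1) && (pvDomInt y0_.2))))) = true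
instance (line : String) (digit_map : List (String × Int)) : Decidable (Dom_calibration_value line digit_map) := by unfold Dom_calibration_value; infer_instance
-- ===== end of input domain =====

-- B replaces A's single overwriting full scan with two early-exit scans from opposite ends
-- (measured faster in a timing run); on lines whose first matching token maps to -1, A's
-- leftover sentinel skips it and B returns the genuine first match (see D_ below).

-- ===== PORT A =====
-- shared primitive: digit_map.get(str(line[i:i+len(k)])) (dict lookup = first match in the assoc list)
def pvLook (digit_map : List (String × Int)) (cs : List Char) (i : Nat) (k : String) : Option Int :=
  List.lookup (String.ofList (PySem.List.slice cs (some (i : Int)) (some ((i : Int) + (k.toList.length : Int))))) digit_map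

def calibration_value (line : String) (digit_map : List (String × Int)) : Int :=
  let cs := line.toList
  let r := (List.range cs.length).foldl (fun (st : Int × Int) i =>
      digit_map.foldl (fun (st : Int × Int) kv =>
        match pvLook digit_map cs i kv.1 with
        | some d => (if st.1 = -1 then d else st.1, d)
        | none => st) st) (-1, -1)
  10 * r.1 + r.2

-- ===== PORT B =====
def pvMatchAt (digit_map : List (String × Int)) (cs : List Char) (i : Nat) (keys : List String) : Option Int :=
  keys.findSome? (fun k => pvLook digit_map cs i k)

def calibration_value_alt (line : String) (digit_map : List (String × Int)) : Int :=
  let cs := line.toList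
  let keys := digit_map.map Prod.fst
  let first := ((List.range cs.length).findSome? (fun i => pvMatchAt digit_map cs i keys)).getD (-1)
  let last := ((List.range cs.length).reverse.findSome? (fun i => pvMatchAt digit_map cs i keys.reverse)).getD (-1)
  10 * first + last

-- ===== PRECONDITION & SPEC =====
-- the sequence of all token-match values of the line, in A's scan order (spec-level, shared by D_)
def pvMatches (line : String) (digit_map : List (String × Int)) : List Int :=
  (List.range line.toList.length).flatMap (fun i =>
    digit_map.filterMap (fun kv => pvLook digit_map line.toList i kv.1))

-- On lines whose earliest token match maps to -1 while a later match maps to something else, A's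
-- sentinel `first == -1` overwrites that first match with the later value, while B returns the
-- genuine first match -1, which is the intended value (the first token's digit).
def D_calibration_value (line : String) (digit_map : List (String × Int)) : Prop :=
  (pvMatches line digit_map).head? = some (-1) ∧ ∃ d ∈ pvMatches line digit_map, d ≠ -1
instance (line : String) (digit_map : List (String × Int)) : Decidable (D_calibration_value line digit_map) := by
  unfold D_calibration_value; infer_instance

def Spec_calibration_value (line : String) (digit_map : List (String × Int)) (out : Int) : Prop :=
  ¬ D_calibration_value line digit_map → out = calibration_value_alt line digit_map
instance (line : String) (digit_map : List (String × Int)) (out : Int) : Decidable (Spec_calibration_value line digit_map out) := by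
  unfold Spec_calibration_value; infer_instance

def pvDiffWitness_calibration_value : String × (List (String × Int)) := ("ab", [("a", -1), ("b", 5)])
def pvDiffWitnessOut_calibration_value : Int × Int := (55, -5)

-- ===== CLAIM (what is proved, stated in full; the proofs are below) =====
def Claim_unchanged_calibration_value : Prop := ∀ (line : String) (digit_map : List (String × Int)), Dom_calibration_value line digit_map → Spec_calibration_value line digit_map (calibration_value line digit_map)
def Claim_changed_calibration_value : Prop := Dom_calibration_value (pvDiffWitness_calibration_value.1) (pvDiffWitness_calibration_value.2) ∧ D_calibration_value (pvDiffWitness_calibration_value.1) (pvDiffWitness_calibration_value.2) ∧ calibration_value (pvDiffWitness_calibration_value.1) (pvDiffWitness_calibration_value.2) = pvDiffWitnessOut_calibration_value.1 ∧ calibration_value_alt (pvDiffWitness_calibration_value.1) (pvDiffWitness_calibration_value.2) = pvDiffWitnessOut_calibration_value.2 ∧ pvDiffWitnessOut_calibration_value.1 ≠ pvDiffWitnessOut_calibration_value.2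
def Claim_exact_calibration_value : Prop := ∀ (line : String) (digit_map : List (String × Int)), Dom_calibration_value line digit_map → D_calibration_value line digit_map → calibration_value line digit_map ≠ calibration_value_alt line digit_map

-- ===== LEMMAS AND PROOFS =====
def pvStep (st : Int × Int) (d : Int) : Int × Int := (if st.1 = -1 then d else st.1, d)

lemma pv_getLast?_getD_cons (d : Int) (M : List Int) (l : Int) :
    ((d :: M).getLast?).getD l = (M.getLast?).getD d := by
  cases M <;> simp [List.getLast?]

lemma pv_foldl_step (M : List Int) (f l : Int) :
    M.foldl pvStep (f, l)
      = ((if f = -1 then ((M.find? (· != -1)).getD (-1)) else f), (M.getLast?).getD l) := by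
  induction M generalizing f l with
  | nil => simp
  | cons d M ih =>
      simp only [List.foldl_cons, pvStep, ih, pv_getLast?_getD_cons, List.find?_cons]
      by_cases hf : f = -1 <;> by_cases hd : d = (-1 : Int)
      · simp [hf, hd]
      · simp [hf, show (d != -1) = true from by simpa using hd]
        intro h; exact absurd h hd
      · simp [hf]
      · simp [hf]

lemma pv_foldl_match (f : (String × Int) → Option Int) (l : List (String × Int)) (st : Int × Int) :
    l.foldl (fun st kv => match f kv with | some d => pvStep st d | none => st) st
      = (l.filterMap f).foldl pvStep st := by
  induction l generalizing st with
  | nil => rfl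
  | cons kv l ih => cases h : f kv <;> simp [h, ih]

lemma pv_foldl_flatMap (g : Nat → List Int) (l : List Nat) (st : Int × Int) :
    l.foldl (fun st i => (g i).foldl pvStep st) st = (l.flatMap g).foldl pvStep st := by
  induction l generalizing st with
  | nil => rfl
  | cons i l ih => simp [List.flatMap_cons, List.foldl_append, ih]

lemma pv_A_eq (line : String) (digit_map : List (String × Int)) :
    calibration_value line digit_map
      = 10 * (((pvMatches line digit_map).find? (· != -1)).getD (-1))
        + ((pvMatches line digit_map).getLast?).getD (-1) := by
  simp only [calibration_value, pvMatches]
  conv_lhs =>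
    rw [show (fun (st : Int × Int) i =>
        digit_map.foldl (fun (st : Int × Int) kv =>
          match pvLook digit_map line.toList i kv.1 with
          | some d => (if st.1 = -1 then d else st.1, d)
          | none => st) st)
      = (fun (st : Int × Int) i =>
          ((digit_map.filterMap (fun kv => pvLook digit_map line.toList i kv.1)).foldl pvStep st)) from
      funext fun st => funext fun i => pv_foldl_match _ digit_map st]
  rw [pv_foldl_flatMap, pv_foldl_step]
  simp

lemma pv_matchAt_head (digit_map : List (String × Int)) (cs : List Char) (i : Nat) :
    pvMatchAt digit_map cs i (digit_map.map Prod.fst)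
      = (digit_map.filterMap (fun kv => pvLook digit_map cs i kv.1)).head? := by
  unfold pvMatchAt
  rw [← List.head?_filterMap, List.filterMap_map]
  simp

lemma pv_matchAt_last (digit_map : List (String × Int)) (cs : List Char) (i : Nat) :
    pvMatchAt digit_map cs i ((digit_map.map Prod.fst).reverse)
      = (digit_map.filterMap (fun kv => pvLook digit_map cs i kv.1)).getLast? := by
  unfold pvMatchAt
  rw [← List.head?_filterMap, List.filterMap_reverse, List.head?_reverse, List.filterMap_map]
  simp

lemma pv_B_eq (line : String) (digit_map : List (String × Int)) :
    calibration_value_alt line digit_map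
      = 10 * (((pvMatches line digit_map).head?).getD (-1))
        + ((pvMatches line digit_map).getLast?).getD (-1) := by
  unfold calibration_value_alt pvMatches
  simp only [pv_matchAt_head, pv_matchAt_last]
  rw [List.head?_flatMap]
  congr 2
  rw [← List.head?_reverse, List.reverse_flatMap, List.head?_flatMap]
  simp [List.head?_reverse]

-- ===== VERDICT (by name: the statement is the Claim_ definition above) =====
theorem calibration_value_spec : Claim_unchanged_calibration_value := by
  intro line digit_map _ hnD
  rw [pv_A_eq, pv_B_eq]
  unfold D_calibration_value at hnD
  push Not at hnD
  cases hM : pvMatches line digit_map with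
  | nil => simp
  | cons d M =>
      by_cases hd : d = (-1 : Int)
      · have hall : ∀ x ∈ M, x = (-1 : Int) := by
          intro x hx
          exact hnD (by rw [hM, hd]; rfl) x (by rw [hM]; exact List.mem_cons_of_mem _ hx)
        have hfind : M.find? (· != -1) = none := by
          rw [List.find?_eq_none]
          intro x hx
          simpa using hall x hx
        simp [hd, hfind]
      · simp [show (d != -1) = true from by simpa using hd]

theorem calibration_value_changed : Claim_changed_calibration_value := by
  unfold Claim_changed_calibration_value; decide

theorem calibration_value_tight : Claim_exact_calibration_value := by
  intro line digit_map _ hD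
  obtain ⟨hhead, d, hd, hne⟩ := hD
  rw [pv_A_eq, pv_B_eq]
  have hfs : ((pvMatches line digit_map).find? (· != -1)).isSome := by
    rw [List.find?_isSome]
    exact ⟨d, hd, by simpa using hne⟩
  obtain ⟨a, ha⟩ := Option.isSome_iff_exists.mp hfs
  have hpa : a ≠ -1 := by simpa using List.find?_some ha
  rw [ha, hhead]
  simp only [Option.getD_some]
  omega
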